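-- pv_equiv track=rewrite | github.com/Stanley5249/ncu-ce7024-assignment-1 | ner/utils.py | _parse_word_and_labels
-- ===== SOURCE A (Python) =====
-- from itertools import groupby
-- from typing import Any
--
-- def _split_word_and_label(token_tag: str) -> list[str]:
--     try:
--         return token_tag.rsplit("\t", 1)
--     except ValueError:
--         raise ValueError(
--             f"expected 2 tab-separated fields, got {token_tag!r}"
--         ) from None
--
-- def _parse_word_and_labels(s: str) -> dict[str, list[list[Any]]]:
--     col_words = []
--     col_labels = []
--     for k, g in groupby(s.splitlines(), bool):
--         if k:
--             words = []
--             labels = []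
--             for word, label in map(_split_word_and_label, g):
--                 words.append(word)
--                 labels.append(label)
--             col_words.append(words)
--             col_labels.append(labels)
--     return {
--         "words": col_words,
--         "labels": col_labels,
--     }
-- ===== SOURCE B (Python) =====
-- def _parse_word_and_labels(s: str) -> dict:
--     col_words = []
--     col_labels = []
--     cur_words = []
--     cur_labels = []
--     for line in s.splitlines():
--         if line:
--             word, label = line.rsplit("\t", 1)
--             cur_words.append(word)
--             cur_labels.append(label)
--         elif cur_words:
--             col_words.append(cur_words)
--             col_labels.append(cur_labels)
--             cur_words = []
--             cur_labels = []
--     if cur_words: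
--         col_words.append(cur_words)
--         col_labels.append(cur_labels)
--     return {"words": col_words, "labels": col_labels}
-- ===== Notes on version B (the rewrite author's own statement) =====
-- stated objective: simpler
-- what changed: Replaces itertools.groupby plus a nested per-group loop (and the helper/map indirection) with one explicit single-pass state machine over the lines, using accumulators that are flushed at blank lines and at the end.
import Mathlib
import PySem

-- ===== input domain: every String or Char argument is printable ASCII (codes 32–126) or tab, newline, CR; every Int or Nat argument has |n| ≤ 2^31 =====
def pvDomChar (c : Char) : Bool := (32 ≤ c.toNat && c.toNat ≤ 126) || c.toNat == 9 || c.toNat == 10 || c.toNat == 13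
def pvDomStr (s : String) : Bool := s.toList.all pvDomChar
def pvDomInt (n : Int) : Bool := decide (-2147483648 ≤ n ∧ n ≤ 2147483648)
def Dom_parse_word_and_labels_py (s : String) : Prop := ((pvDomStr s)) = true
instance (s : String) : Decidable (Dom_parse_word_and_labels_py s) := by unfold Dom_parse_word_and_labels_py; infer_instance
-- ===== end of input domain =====

-- B replaces itertools.groupby + nested per-group loop by one explicit single-pass
-- state machine with flush-on-blank accumulators (objective: simpler decomposition).

-- ===== PORT A =====

-- line.rsplit("\t", 1): split at the LAST tab (list of 2), or the whole string (list of 1)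
def pvRsplitTab1 (line : String) : List String :=
  let r := line.toList.reverse
  if '\t' ∈ r then
    let j := r.idxOf '\t'
    [String.ofList ((r.drop (j+1)).reverse), String.ofList ((r.take j).reverse)]
  else [line]

-- 'word, label = parts': the 2-tuple unpack; on a 1-element list Python raises
-- ValueError (excluded by Pre_), here an arbitrary default
def pvUnpack2 : List String → String × String
  | [a, b] => (a, b)
  | _ => ("", "")

def pvSplitWL (line : String) : String × String := pvUnpack2 (pvRsplitTab1 line)

-- groupby(lines, bool), keeping only the truthy groups (k = True)
def pvGroupTruthy : List String → List (List String)
  | [] => []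
  | l :: ls =>
    if l = "" then pvGroupTruthy ls
    else (l :: ls.takeWhile (fun x => x ≠ "")) :: pvGroupTruthy (ls.dropWhile (fun x => x ≠ ""))
termination_by ls => ls.length
decreasing_by
  · simp
  · have := List.length_dropWhile_le (fun x => x ≠ "") ls
    simp at this ⊢; omega

def parse_word_and_labels_py (s : String) : List (String × List (List String)) :=
  let runs := pvGroupTruthy (PySem.Str.splitlines s)
  let cols := runs.foldl (fun acc run =>
      let wl := run.foldl (fun wl line =>
          let p := pvSplitWL line
          (wl.1 ++ [p.1], wl.2 ++ [p.2])) ([], [])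
      (acc.1 ++ [wl.1], acc.2 ++ [wl.2])) ([], [])
  [("words", cols.1), ("labels", cols.2)]

-- ===== PORT B =====

-- state: ((col_words, col_labels), (cur_words, cur_labels))
def pvStepB (st : (List (List String) × List (List String)) × (List String × List String))
    (line : String) : (List (List String) × List (List String)) × (List String × List String) :=
  if line ≠ "" then
    let p := pvSplitWL line
    (st.1, (st.2.1 ++ [p.1], st.2.2 ++ [p.2]))
  else if st.2.1 ≠ [] then
    ((st.1.1 ++ [st.2.1], st.1.2 ++ [st.2.2]), ([], []))
  else st

def pvFlush (st : (List (List String) × List (List String)) × (List String × List String)) :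
    List (List String) × List (List String) :=
  if st.2.1 ≠ [] then (st.1.1 ++ [st.2.1], st.1.2 ++ [st.2.2]) else st.1

def parse_word_and_labels_py_alt (s : String) : List (String × List (List String)) :=
  let st := (PySem.Str.splitlines s).foldl pvStepB (([], []), ([], []))
  let cols := pvFlush st
  [("words", cols.1), ("labels", cols.2)]

-- ===== PRECONDITION & SPEC =====
-- Pre_ excludes exactly the inputs where a non-blank line has no tab: there Python A
-- raises ValueError from unpacking the 1-element rsplit result (B raises identically).
def Pre_parse_word_and_labels_py (s : String) : Prop :=
  ∀ line ∈ PySem.Str.splitlines s, line ≠ "" → '\t' ∈ line.toList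
instance (s : String) : Decidable (Pre_parse_word_and_labels_py s) := by
  unfold Pre_parse_word_and_labels_py; infer_instance

def pvWitness_parse_word_and_labels_py : String := "a\tB\nbb\tC\n\n\ncc dd\tD"

def Spec_parse_word_and_labels_py (s : String) (out : List (String × List (List String))) : Prop := out = parse_word_and_labels_py_alt s
instance (s : String) (out : List (String × List (List String))) : Decidable (Spec_parse_word_and_labels_py s out) := by unfold Spec_parse_word_and_labels_py; infer_instance

-- ===== CLAIM (what is proved, stated in full; the proofs are below) =====
def Claim_equal_parse_word_and_labels_py : Prop := ∀ (s : String), Dom_parse_word_and_labels_py s → Pre_parse_word_and_labels_py s → Spec_parse_word_and_labels_py s (parse_word_and_labels_py s)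

-- ===== LEMMAS AND PROOFS =====

theorem pv_innerFold (run : List String) (wl : List String × List String) :
    run.foldl (fun wl line =>
        let p := pvSplitWL line
        (wl.1 ++ [p.1], wl.2 ++ [p.2])) wl
      = (wl.1 ++ run.map (fun x => (pvSplitWL x).1), wl.2 ++ run.map (fun x => (pvSplitWL x).2)) := by
  induction run generalizing wl with
  | nil => simp
  | cons a t ih => simp [List.foldl_cons, ih]

theorem pv_outerFold (runs : List (List String)) (acc : List (List String) × List (List String)) :
    runs.foldl (fun acc run =>
        let wl := run.foldl (fun wl line =>
            let p := pvSplitWL line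
            (wl.1 ++ [p.1], wl.2 ++ [p.2])) ([], [])
        (acc.1 ++ [wl.1], acc.2 ++ [wl.2])) acc
      = (acc.1 ++ runs.map (fun run => run.map (fun x => (pvSplitWL x).1)),
         acc.2 ++ runs.map (fun run => run.map (fun x => (pvSplitWL x).2))) := by
  induction runs generalizing acc with
  | nil => simp
  | cons r t ih => rw [List.foldl_cons, ih]; simp [pv_innerFold]

theorem pv_runFold (run : List String) (h : ∀ x ∈ run, x ≠ "")
    (rest : List String) (st : (List (List String) × List (List String)) × (List String × List String)) :
    (run ++ rest).foldl pvStepB st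
      = rest.foldl pvStepB
          (st.1, (st.2.1 ++ run.map (fun x => (pvSplitWL x).1),
                  st.2.2 ++ run.map (fun x => (pvSplitWL x).2))) := by
  induction run generalizing st with
  | nil => simp
  | cons a t ih =>
    have ha : a ≠ "" := h a (by simp)
    simp only [List.cons_append, List.foldl_cons]
    rw [ih (fun x hx => h x (by simp [hx]))]
    simp [pvStepB, ha]

theorem pv_dropWhile_head {α : Type} (p : α → Bool) (ls : List α) (x : α) (xs : List α)
    (h : ls.dropWhile p = x :: xs) : p x = false := by
  induction ls with
  | nil => simp at h
  | cons a t ih =>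
    by_cases ha : p a = true
    · rw [List.dropWhile_cons_of_pos ha] at h
      exact ih h
    · rw [List.dropWhile_cons_of_neg ha] at h
      cases h
      simpa using ha

theorem pv_main (lines : List String) (cW cL : List (List String)) :
    pvFlush (lines.foldl pvStepB ((cW, cL), ([], [])))
      = (cW ++ (pvGroupTruthy lines).map (fun run => run.map (fun x => (pvSplitWL x).1)),
         cL ++ (pvGroupTruthy lines).map (fun run => run.map (fun x => (pvSplitWL x).2))) := by
  induction lines using pvGroupTruthy.induct generalizing cW cL with
  | case1 => simp [pvGroupTruthy, pvFlush]
  | case2 ls ih =>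
    simp only [List.foldl_cons, pvStepB, pvGroupTruthy]
    simp [ih]
  | case3 l ls hl ih =>
    have hrun : ∀ x ∈ l :: ls.takeWhile (fun y => decide (y ≠ "")), x ≠ "" := by
      intro x hx
      rcases List.mem_cons.mp hx with h | h
      · simpa [h] using hl
      · have := List.mem_takeWhile_imp h
        simpa using this
    have hg : pvGroupTruthy (l :: ls)
        = (l :: ls.takeWhile (fun y => decide (y ≠ "")))
            :: pvGroupTruthy (ls.dropWhile (fun y => decide (y ≠ ""))) := by
      rw [pvGroupTruthy]
      simp [hl]
    have hsplit : l :: ls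
        = (l :: ls.takeWhile (fun y => decide (y ≠ ""))) ++ ls.dropWhile (fun y => decide (y ≠ "")) := by
      simp [List.takeWhile_append_dropWhile]
    rw [hg]
    conv_lhs => rw [hsplit]
    rw [pv_runFold _ hrun]
    dsimp only
    rcases hd : ls.dropWhile (fun y => decide (y ≠ "")) with _ | ⟨x, xs⟩
    · simp [pvFlush, pvGroupTruthy]
    · have hx : x = "" := by simpa using pv_dropWhile_head _ ls x xs hd
      subst hx
      rw [List.foldl_cons]
      simp only [List.nil_append]
      have hstep : pvStepB ((cW, cL),
          ((l :: ls.takeWhile (fun y => decide (y ≠ ""))).map (fun x => (pvSplitWL x).1),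
           (l :: ls.takeWhile (fun y => decide (y ≠ ""))).map (fun x => (pvSplitWL x).2))) ""
          = ((cW ++ [(l :: ls.takeWhile (fun y => decide (y ≠ ""))).map (fun x => (pvSplitWL x).1)],
              cL ++ [(l :: ls.takeWhile (fun y => decide (y ≠ ""))).map (fun x => (pvSplitWL x).2)]),
             ([], [])) := by
        simp [pvStepB]
      rw [hstep]
      have hnoop : ∀ st : (List (List String) × List (List String)),
          ("" :: xs).foldl pvStepB (st, ([], [])) = xs.foldl pvStepB (st, ([], [])) := by
        intro st
        rw [List.foldl_cons]
        simp [pvStepB]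
      have := ih (cW ++ [(l :: ls.takeWhile (fun y => decide (y ≠ ""))).map (fun x => (pvSplitWL x).1)])
                 (cL ++ [(l :: ls.takeWhile (fun y => decide (y ≠ ""))).map (fun x => (pvSplitWL x).2)])
      rw [hd, hnoop] at this
      rw [this]
      simp

-- ===== VERDICT (by name: the statement is the Claim_ definition above) =====
theorem parse_word_and_labels_py_spec : Claim_equal_parse_word_and_labels_py := by
  intro s _ _
  show parse_word_and_labels_py s = parse_word_and_labels_py_alt s
  unfold parse_word_and_labels_py parse_word_and_labels_py_alt
  dsimp only
  rw [pv_outerFold, pv_main]
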